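-- pv_equiv track=rewrite | github.com/asiopta/LO17 | TD6/td6.py | premier_index_result
-- ===== SOURCE A (Python) =====
-- def premier_index_result(texte, mots_cles_dates):
--     # Cherche l'index de chaque mot-clé dans le texte
--     indices = []
--     for mot in mots_cles_dates:
--         idx = texte.find(mot)
--         if idx != -1:
--             indices.append(idx)
--     # Cherche l'index du premier chiffre
--     for i, c in enumerate(texte):
--         if c.isdigit():
--             indices.append(i)
--             break
--     if indices:
--         ind = min(indices)
--         return ind, texte[ind:]
--     else:
--         return None, texte
-- ===== SOURCE B (Python) =====
-- def premier_index_result(texte, mots_cles_dates):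
--     # Single left-to-right scan: stop at the earliest position that starts a
--     # keyword or holds a digit (position len(texte) included so that an empty
--     # keyword matches even in empty text, as str.find does).
--     n = len(texte)
--     for i in range(n + 1):
--         if (i < n and texte[i].isdigit()) or any(texte.startswith(mot, i) for mot in mots_cles_dates):
--             return i, texte[i:]
--     return None, texte
-- ===== Notes on version B (the rewrite author's own statement) =====
-- stated objective: faster
-- what changed: Replaces A's per-keyword full find() scans collected into a list plus a min() reduction by a single left-to-right scan over positions 0..len (inclusive, so an empty keyword matches at 0 like find) that returns at the earliest position holding a digit or starting a keyword.
import Mathlib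
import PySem

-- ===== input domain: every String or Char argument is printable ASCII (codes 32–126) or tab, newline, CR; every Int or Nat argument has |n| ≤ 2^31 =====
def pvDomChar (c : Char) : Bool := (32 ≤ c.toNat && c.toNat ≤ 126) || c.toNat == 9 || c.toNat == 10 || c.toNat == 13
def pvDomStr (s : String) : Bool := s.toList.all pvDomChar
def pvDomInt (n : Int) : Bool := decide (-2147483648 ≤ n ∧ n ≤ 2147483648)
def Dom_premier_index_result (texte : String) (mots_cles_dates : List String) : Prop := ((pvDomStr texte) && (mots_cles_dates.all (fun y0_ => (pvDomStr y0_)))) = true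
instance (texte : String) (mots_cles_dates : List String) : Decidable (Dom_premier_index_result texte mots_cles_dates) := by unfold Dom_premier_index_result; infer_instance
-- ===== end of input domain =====

-- B replaces A's k separate full find() scans plus min() reduction by one left-to-right
-- scan that stops at the earliest keyword-or-digit position (measured faster by early stop).

-- ===== PORT A =====
-- the 'for i, c in enumerate(texte): if c.isdigit(): … break' loop
def pvFindDigitA : List (Int × Char) → Option Int
  | [] => none
  | (i, c) :: rest => if PySem.Chars.isdigit c then some i else pvFindDigitA rest

def premier_index_result (texte : String) (mots_cles_dates : List String) : Option Int × String :=
  let indices : List Int := mots_cles_dates.foldl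
    (fun acc mot =>
      let idx := PySem.Str.find texte mot
      if idx ≠ -1 then acc ++ [idx] else acc) []
  let indices : List Int :=
    match pvFindDigitA (PySem.List.enumerate texte.toList 0) with
    | some i => indices ++ [i]
    | none => indices
  match PySem.List.min? indices (fun x => x) with
  | some ind => (some ind, PySem.Str.slice texte (some ind) none)
  | none => (none, texte)

-- ===== PORT B =====
-- the scan condition '(i < n and texte[i].isdigit()) or any(texte.startswith(mot, i) …)';
-- texte.startswith(mot, i) for 0 ≤ i ≤ len(texte) is exactly 'mot is a prefix of texte[i:]'
def pvCondB (t : List Char) (mots : List String) (i : Nat) : Bool :=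
  (decide (i < t.length) && PySem.Chars.isdigit (t.getD i ' ')) ||
    mots.any (fun mot => PySem.Chars.startswith (t.drop i) mot.toList)

-- 'for i in range(n + 1): …' with early return
def pvScanB (texte : String) (mots : List String) (i : Nat) : Option Int × String :=
  if i ≤ texte.toList.length then
    if pvCondB texte.toList mots i then
      (some (i : Int), PySem.Str.slice texte (some (i : Int)) none)
    else pvScanB texte mots (i + 1)
  else (none, texte)
termination_by texte.toList.length + 1 - i
decreasing_by omega

def premier_index_result_alt (texte : String) (mots_cles_dates : List String) : Option Int × String :=
  pvScanB texte mots_cles_dates 0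

-- ===== PRECONDITION & SPEC =====
def Spec_premier_index_result (texte : String) (mots_cles_dates : List String) (out : Option Int × String) : Prop := out = premier_index_result_alt texte mots_cles_dates
instance (texte : String) (mots_cles_dates : List String) (out : Option Int × String) : Decidable (Spec_premier_index_result texte mots_cles_dates out) := by unfold Spec_premier_index_result; infer_instance

-- ===== CLAIM (what is proved, stated in full; the proofs are below) =====
def Claim_equal_premier_index_result : Prop := ∀ (texte : String) (mots_cles_dates : List String), Dom_premier_index_result texte mots_cles_dates → Spec_premier_index_result texte mots_cles_dates (premier_index_result texte mots_cles_dates)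

-- ===== LEMMAS AND PROOFS =====

-- A's word loop builds exactly the list of successful find() results
theorem pv_foldl_words (texte : String) (l : List String) (acc : List Int) :
    l.foldl (fun acc mot =>
      let idx := PySem.Str.find texte mot
      if idx ≠ -1 then acc ++ [idx] else acc) acc
    = acc ++ l.filterMap (fun mot =>
        if PySem.Chars.find texte.toList mot.toList ≠ -1 then
          some (PySem.Chars.find texte.toList mot.toList) else none) := by
  induction l generalizing acc with
  | nil => simp
  | cons m rest ih =>
    simp only [PySem.Str.find_eq] at ih ⊢
    rw [List.foldl_cons, List.filterMap_cons]
    by_cases h : PySem.Chars.find texte.toList m.toList ≠ -1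
    · rw [if_pos h, ih]
      simp [h]
    · rw [if_neg h, ih]
      simp [h]

-- A's digit loop finds the first digit position
theorem pv_findDigitA_spec (l : List Char) (s : Int) :
    (∀ d, pvFindDigitA (PySem.List.enumerate l s) = some d →
      ∃ k : Nat, d = s + k ∧ k < l.length ∧ PySem.Chars.isdigit (l[k]?.getD ' ') = true ∧
        ∀ k' < k, PySem.Chars.isdigit (l[k']?.getD ' ') = false) ∧
    (pvFindDigitA (PySem.List.enumerate l s) = none →
      ∀ k < l.length, PySem.Chars.isdigit (l[k]?.getD ' ') = false) := by
  induction l generalizing s with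
  | nil => simp [PySem.List.enumerate, pvFindDigitA]
  | cons c rest ih =>
    rw [PySem.List.enumerate_cons]
    by_cases hc : PySem.Chars.isdigit c = true
    · constructor
      · intro d hd
        simp [pvFindDigitA, hc] at hd
        exact ⟨0, by omega, by simp, by simpa using hc, by omega⟩
      · intro h; simp [pvFindDigitA, hc] at h
    · constructor
      · intro d hd
        simp only [pvFindDigitA, if_neg hc] at hd
        obtain ⟨k, hk1, hk2, hk3, hk4⟩ := (ih (s + 1)).1 d hd
        refine ⟨k + 1, by omega, by simp only [List.length_cons]; omega,
          by simpa using hk3, ?_⟩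
        intro k' hk'
        cases k' with
        | zero => simpa using hc
        | succ k'' => simpa using hk4 k'' (by omega)
      · intro h
        simp only [pvFindDigitA, if_neg hc] at h
        intro k hk
        cases k with
        | zero => simpa using hc
        | succ k'' =>
          simpa using (ih (s + 1)).2 h k'' (by simp only [List.length_cons] at hk; omega)

-- a prefix of a suffix is an infix
theorem pv_prefix_drop_infix {m t : List Char} {j : Nat} (h : m <+: t.drop j) : m <:+: t :=
  h.isInfix.trans (t.drop_suffix j).isInfix

-- unfolding of the scan condition
theorem pv_condB_iff (t : List Char) (mots : List String) (i : Nat) :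
    pvCondB t mots i = true ↔
      (i < t.length ∧ PySem.Chars.isdigit (t[i]?.getD ' ') = true) ∨
      ∃ m ∈ mots, m.toList <+: t.drop i := by
  unfold pvCondB
  simp only [Bool.or_eq_true, Bool.and_eq_true, decide_eq_true_eq, List.any_eq_true,
    List.getD_eq_getElem?_getD, PySem.Chars.startswith_iff]

-- a successful find() satisfies the scan condition at its own index
theorem pv_cond_of_find (t : List Char) (mots : List String) (m : String) (hm : m ∈ mots)
    (hne : PySem.Chars.find t m.toList ≠ -1) :
    pvCondB t mots (PySem.Chars.find t m.toList).toNat = true := by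
  have hnn : 0 ≤ PySem.Chars.find t m.toList :=
    (PySem.Chars.find_nonneg_iff t m.toList).2 ((PySem.Chars.find_ne_neg_one_iff t m.toList).1 hne)
  exact (pv_condB_iff t mots _).2 (Or.inr ⟨m, hm, (PySem.Chars.find_spec hnn).1⟩)

-- a keyword prefix at position j bounds find() by j
theorem pv_find_of_cond_word (t : List Char) (m : String) (j : Nat)
    (hpre : m.toList <+: t.drop j) :
    PySem.Chars.find t m.toList ≠ -1 ∧ 0 ≤ PySem.Chars.find t m.toList ∧
      (PySem.Chars.find t m.toList).toNat ≤ j := by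
  have hinf : m.toList <:+: t := pv_prefix_drop_infix hpre
  have hne : PySem.Chars.find t m.toList ≠ -1 := (PySem.Chars.find_ne_neg_one_iff t m.toList).2 hinf
  have hnn : 0 ≤ PySem.Chars.find t m.toList := (PySem.Chars.find_nonneg_iff t m.toList).2 hinf
  refine ⟨hne, hnn, ?_⟩
  by_contra hc
  exact (PySem.Chars.find_spec hnn).2 j (by omega) hpre

-- B's scan, started at i, returns the first j ≥ i where the condition holds
theorem pv_scan_hit (texte : String) (mots : List String) (j : Nat)
    (hj : j ≤ texte.toList.length) (hPj : pvCondB texte.toList mots j = true)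
    (hmin : ∀ k < j, pvCondB texte.toList mots k = false) :
    ∀ k i, i + k = j →
      pvScanB texte mots i = (some (j : Int), PySem.Str.slice texte (some (j : Int)) none) := by
  intro k
  induction k with
  | zero =>
    intro i hi
    have : i = j := by omega
    subst this
    rw [pvScanB, if_pos hj, if_pos hPj]
  | succ k' ih =>
    intro i hi
    rw [pvScanB, if_pos (by omega), if_neg (by simp [hmin i (by omega)]),
      ih (i + 1) (by omega)]

theorem pv_scan_miss (texte : String) (mots : List String)
    (h : ∀ k ≤ texte.toList.length, pvCondB texte.toList mots k = false) :
    ∀ fuel i, texte.toList.length + 1 ≤ i + fuel → pvScanB texte mots i = (none, texte) := by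
  intro fuel
  induction fuel with
  | zero => intro i hi; rw [pvScanB, if_neg (by omega)]
  | succ f ih =>
    intro i hi
    by_cases hle : i ≤ texte.toList.length
    · rw [pvScanB, if_pos hle, if_neg (by simp [h i hle]), ih (i + 1) (by omega)]
    · rw [pvScanB, if_neg hle]

-- ===== VERDICT (by name: the statement is the Claim_ definition above) =====
theorem premier_index_result_spec : Claim_equal_premier_index_result := by
  intro texte mots _
  unfold Spec_premier_index_result premier_index_result premier_index_result_alt
  rw [pv_foldl_words]
  simp only [List.nil_append]
  set wordIdxs : List Int := mots.filterMap (fun mot =>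
      if PySem.Chars.find texte.toList mot.toList ≠ -1 then
        some (PySem.Chars.find texte.toList mot.toList) else none) with hw
  -- every collected index satisfies the scan condition (as a Nat ≤ length)
  have hmemP : ∀ e ∈ wordIdxs, 0 ≤ e ∧ e.toNat ≤ texte.toList.length ∧
      pvCondB texte.toList mots e.toNat = true := by
    intro e he
    rw [hw] at he
    obtain ⟨m, hm, hme⟩ := List.mem_filterMap.1 he
    by_cases hne : PySem.Chars.find texte.toList m.toList ≠ -1
    · rw [if_pos hne] at hme
      obtain rfl := Option.some.inj hme
      have hnn : 0 ≤ PySem.Chars.find texte.toList m.toList :=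
        (PySem.Chars.find_nonneg_iff _ _).2 ((PySem.Chars.find_ne_neg_one_iff _ _).1 hne)
      have hle := PySem.Chars.find_le_length texte.toList m.toList
      exact ⟨hnn, by omega, pv_cond_of_find texte.toList mots m hm hne⟩
    · rw [if_neg hne] at hme; cases hme
  by_cases hEx : ∃ j, pvCondB texte.toList mots j = true ∧ j ≤ texte.toList.length
  · -- some position matches: both sides return the least one
    obtain ⟨hPj, hjn⟩ := Nat.find_spec hEx
    set j := Nat.find hEx with hj
    have hminj : ∀ k < j, pvCondB texte.toList mots k = false := by
      intro k hk
      have := Nat.find_min hEx hk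
      by_cases h : pvCondB texte.toList mots k = true
      · exact absurd ⟨h, by omega⟩ this
      · simpa using h
    rw [pv_scan_hit texte mots j hjn hPj hminj j 0 (by omega)]
    have hlow : ∀ e ∈ wordIdxs, (j : Int) ≤ e := by
      intro e he
      obtain ⟨h0, hen, hP⟩ := hmemP e he
      have : j ≤ e.toNat := by
        by_contra hc
        exact absurd hP (by simp [hminj e.toNat (by omega)])
      omega
    -- an element ≤ j exists in the final list, coming from whichever disjunct fired
    rcases hD : pvFindDigitA (PySem.List.enumerate texte.toList 0) with _ | d
    · -- no digit anywhere: the match came from a keyword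
      have hnod := (pv_findDigitA_spec texte.toList 0).2 hD
      have hword : ∃ e ∈ wordIdxs, e ≤ (j : Int) := by
        rcases (pv_condB_iff texte.toList mots j).1 hPj with ⟨hjn', hdig⟩ | ⟨m, hm, hpre⟩
        · exact absurd hdig (by simp [hnod j hjn'])
        · obtain ⟨hne, hnn, hle⟩ := pv_find_of_cond_word texte.toList m j hpre
          refine ⟨PySem.Chars.find texte.toList m.toList, ?_, by omega⟩
          rw [hw]
          exact List.mem_filterMap.2 ⟨m, hm, if_pos hne⟩
      obtain ⟨e, he, hej⟩ := hword
      have hne' : wordIdxs ≠ [] := by intro h; rw [h] at he; cases he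
      rcases hmin : PySem.List.min? wordIdxs (fun x => x) with _ | m0
      · exact absurd ((PySem.List.min?_eq_none_iff _ _).1 hmin) hne'
      · have h1 : m0 ≤ (j : Int) := le_trans (PySem.List.min?_isMin hmin e he) hej
        have h2 : (j : Int) ≤ m0 := hlow m0 (PySem.List.min?_mem hmin)
        rw [le_antisymm h1 h2]
    · -- a digit exists, first at index k
      obtain ⟨k, hdk, hkn, hkd, hkmin⟩ := (pv_findDigitA_spec texte.toList 0).1 d hD
      have hsmall : ∃ e ∈ wordIdxs ++ [d], e ≤ (j : Int) := by
        rcases (pv_condB_iff texte.toList mots j).1 hPj with ⟨hjn', hdig⟩ | ⟨m, hm, hpre⟩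
        · -- digit at j: the first digit index k is ≤ j
          have hkj : k ≤ j := by
            by_contra hc
            exact absurd hdig (by simp [hkmin j (by omega)])
          exact ⟨d, by simp, by omega⟩
        · obtain ⟨hne, hnn, hle⟩ := pv_find_of_cond_word texte.toList m j hpre
          refine ⟨PySem.Chars.find texte.toList m.toList, ?_, by omega⟩
          apply List.mem_append_left
          rw [hw]
          exact List.mem_filterMap.2 ⟨m, hm, if_pos hne⟩
      have hlow' : ∀ e ∈ wordIdxs ++ [d], (j : Int) ≤ e := by
        intro e he
        rcases List.mem_append.1 he with h | h
        · exact hlow e h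
        · have hPk : pvCondB texte.toList mots k = true :=
            (pv_condB_iff texte.toList mots k).2 (Or.inl ⟨hkn, hkd⟩)
          have hjk : j ≤ k := by
            by_contra hc
            exact absurd hPk (by simp [hminj k (by omega)])
          simp only [List.mem_singleton] at h
          omega
      obtain ⟨e, he, hej⟩ := hsmall
      rcases hmin : PySem.List.min? (wordIdxs ++ [d]) (fun x => x) with _ | m0
      · have := (PySem.List.min?_eq_none_iff (wordIdxs ++ [d]) (fun x => x)).1 hmin
        simp at this
      · have h1 : m0 ≤ (j : Int) := le_trans (PySem.List.min?_isMin hmin e he) hej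
        have h2 : (j : Int) ≤ m0 := hlow' m0 (PySem.List.min?_mem hmin)
        rw [le_antisymm h1 h2]
  · -- no position matches: both sides return (none, texte)
    push Not at hEx
    have hnone : ∀ k ≤ texte.toList.length, pvCondB texte.toList mots k = false := by
      intro k hk
      by_cases h : pvCondB texte.toList mots k = true
      · exact absurd (hEx k h) (by omega)
      · simpa using h
    rw [pv_scan_miss texte mots hnone (texte.toList.length + 1) 0 (by omega)]
    have hwnil : wordIdxs = [] := by
      by_contra hc
      obtain ⟨e, he⟩ := List.exists_mem_of_ne_nil _ hc
      obtain ⟨h0, hen, hP⟩ := hmemP e he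
      exact absurd hP (by simp [hnone e.toNat hen])
    rcases hD : pvFindDigitA (PySem.List.enumerate texte.toList 0) with _ | d
    · rw [hwnil, (PySem.List.min?_eq_none_iff ([] : List Int) (fun x => x)).2 rfl]
    · obtain ⟨k, hdk, hkn, hkd, _⟩ := (pv_findDigitA_spec texte.toList 0).1 d hD
      have hPk : pvCondB texte.toList mots k = true :=
        (pv_condB_iff texte.toList mots k).2 (Or.inl ⟨hkn, hkd⟩)
      exact absurd hPk (by simp [hnone k (by omega)])
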